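-- pv_equiv track=rewrite | github.com/CulverLab/sparcd-web | server/image_utils.py | _split_species_string
-- ===== SOURCE A (Python) =====
-- def _split_species_string(species: str) -> tuple:
--     """ Splits the EXIF string into an array of species information
--     Arguments:
--         species :the EXIT species string
--     Returns:
--         A tuple of species information strings
--     """
--     return_species = []
--     working_str = species
--     last_sep = 0
--     cur_start = 0
--     while True:
--         cur_sep = working_str.find(',', last_sep)
--         if cur_sep == -1:
--             break
--         last_sep = cur_sep + 1
--         cur_sep = working_str.find(',', last_sep)
--         if cur_sep == -1:
--             break
--         last_sep = cur_sep + 1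
--         cur_sep = working_str.find('.', last_sep)
--         if cur_sep == -1:
--             break
--         last_sep = cur_sep + 1
--         return_species.append(working_str[cur_start:cur_sep])
--         cur_start = last_sep + 0
--         if cur_start > len(species):
--             break
--     return return_species
-- ===== SOURCE B (Python) =====
-- def _split_species_string(species: str) -> tuple:
--     """Single-pass state machine: accumulate characters, counting commas;
--     after two commas, the next period closes a record."""
--     records = []
--     buf = []
--     commas = 0
--     for ch in species:
--         if commas >= 2 and ch == '.':
--             records.append(''.join(buf))
--             buf = []
--             commas = 0
--         else:
--             buf.append(ch)
--             if ch == ',':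
--                 commas += 1
--     return records
-- ===== Notes on version B (the rewrite author's own statement) =====
-- stated objective: simpler
-- what changed: A's while-True loop of repeated str.find calls with last_sep/cur_start offset bookkeeping and slicing is replaced by a single left-to-right character pass: a state machine that buffers characters and counts commas, closing a record at the first period seen after two commas.
import Mathlib
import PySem

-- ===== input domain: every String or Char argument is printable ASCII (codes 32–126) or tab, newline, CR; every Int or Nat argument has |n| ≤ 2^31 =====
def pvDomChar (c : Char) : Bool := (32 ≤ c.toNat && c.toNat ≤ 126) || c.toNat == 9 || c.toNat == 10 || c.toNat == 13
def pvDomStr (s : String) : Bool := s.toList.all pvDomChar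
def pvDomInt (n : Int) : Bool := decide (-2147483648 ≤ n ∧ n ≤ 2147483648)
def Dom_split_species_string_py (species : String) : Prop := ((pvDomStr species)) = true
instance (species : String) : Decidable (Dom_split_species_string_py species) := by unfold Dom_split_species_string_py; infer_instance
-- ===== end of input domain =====

-- B replaces A's repeated find/offset bookkeeping by a single left-to-right
-- character pass with a comma counter (simpler decomposition; same cost class).

-- ===== PORT A =====
-- A's `while True` loop of find calls with offset bookkeeping; `fuel` only
-- makes the loop total (each appended record consumes at least three
-- characters of the string, so `length + 1` fuel is never exhausted).
def pyALoop (s : List Char) (fuel : Nat) (last_sep cur_start : Int) (acc : List String) : List String :=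
  match fuel with
  | 0 => acc
  | fuel + 1 =>
    let cur_sep := PySem.Chars.findFrom s [','] last_sep
    if cur_sep = -1 then acc else
    let last_sep := cur_sep + 1
    let cur_sep := PySem.Chars.findFrom s [','] last_sep
    if cur_sep = -1 then acc else
    let last_sep := cur_sep + 1
    let cur_sep := PySem.Chars.findFrom s ['.'] last_sep
    if cur_sep = -1 then acc else
    let last_sep := cur_sep + 1
    let acc := acc ++ [String.ofList (PySem.List.slice s (some cur_start) (some cur_sep))]
    let cur_start := last_sep + 0
    if cur_start > (s.length : Int) then acc
    else pyALoop s fuel last_sep cur_start acc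

def split_species_string_py (species : String) : List String :=
  pyALoop species.toList (species.toList.length + 1) 0 0 []

-- ===== PORT B =====
-- one step of B's state machine: state = (records, buf, commas)
def bStep : List String × List Char × Int → Char → List String × List Char × Int
  | (recs, buf, commas), ch =>
    if 2 ≤ commas ∧ ch = '.' then (recs ++ [String.ofList buf], [], 0)
    else (recs, buf ++ [ch], commas + (if ch = ',' then 1 else 0))

def split_species_string_py_alt (species : String) : List String :=
  (species.toList.foldl bStep ([], [], 0)).1

-- ===== PRECONDITION & SPEC =====
def Spec_split_species_string_py (species : String) (out : List String) : Prop := out = split_species_string_py_alt species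
instance (species : String) (out : List String) : Decidable (Spec_split_species_string_py species out) := by unfold Spec_split_species_string_py; infer_instance

-- ===== CLAIM (what is proved, stated in full; the proofs are below) =====
def Claim_equal_split_species_string_py : Prop := ∀ (species : String), Dom_split_species_string_py species → Spec_split_species_string_py species (split_species_string_py species)

-- ===== LEMMAS AND PROOFS =====

lemma bfold_recs_mono (l : List Char) (recs : List String) (buf : List Char) (c : Int) :
    (l.foldl bStep (recs, buf, c)).1 = recs ++ (l.foldl bStep ([], buf, c)).1 := by
  induction l generalizing recs buf c with
  | nil => simp
  | cons ch t ih =>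
    simp only [List.foldl_cons, bStep]
    split_ifs with h
    · rw [ih (recs ++ _) [] 0, ih ([] ++ _) [] 0]; simp
    · exact ih recs _ _
    · exact ih recs _ _

lemma bfold_consume_nocomma (pre rest : List Char) (recs : List String) (buf : List Char)
    (c : Int) (hpre : (',' : Char) ∉ pre) (hc : c ≤ 1) :
    (pre ++ rest).foldl bStep (recs, buf, c) = rest.foldl bStep (recs, buf ++ pre, c) := by
  induction pre generalizing buf with
  | nil => simp
  | cons ch t ih =>
    simp only [List.mem_cons, not_or] at hpre
    simp only [List.cons_append, List.foldl_cons, bStep]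
    rw [if_neg (by omega : ¬(2 ≤ c ∧ ch = '.')),
        if_neg (fun h => hpre.1 h.symm), add_zero, ih _ hpre.2]
    simp

lemma bfold_nocomma (l : List Char) (recs : List String) (buf : List Char)
    (c : Int) (hl : (',' : Char) ∉ l) (hc : c ≤ 1) :
    (l.foldl bStep (recs, buf, c)).1 = recs := by
  have := bfold_consume_nocomma l [] recs buf c hl hc
  simp at this
  simp [this]

lemma bfold_consume_dot (pre rest : List Char) (recs : List String) (buf : List Char)
    (c : Int) (hpre : ('.' : Char) ∉ pre) (hc : 2 ≤ c) :
    (pre ++ '.' :: rest).foldl bStep (recs, buf, c)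
      = rest.foldl bStep (recs ++ [String.ofList (buf ++ pre)], [], 0) := by
  induction pre generalizing buf c with
  | nil => simp [bStep, hc]
  | cons ch t ih =>
    simp only [List.mem_cons, not_or] at hpre
    simp only [List.cons_append, List.foldl_cons, bStep]
    rw [if_neg (fun h => hpre.1 h.2.symm),
        ih _ _ hpre.2 (by split_ifs <;> omega)]
    simp

lemma bfold_nodot (l : List Char) (recs : List String) (buf : List Char)
    (c : Int) (hl : ('.' : Char) ∉ l) (hc : 2 ≤ c) :
    (l.foldl bStep (recs, buf, c)).1 = recs := by
  induction l generalizing buf c with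
  | nil => simp
  | cons ch t ih =>
    simp only [List.mem_cons, not_or] at hl
    simp only [List.foldl_cons, bStep]
    rw [if_neg (fun h => hl.1 h.2.symm)]
    exact ih _ _ hl.2 (by split_ifs <;> omega)

lemma find_char_none {l : List Char} {ch : Char}
    (h : PySem.Chars.find l [ch] = -1) : ch ∉ l := by
  have := (PySem.Chars.find_eq_neg_one_iff l [ch]).mp h
  exact fun hm => this ((List.singleton_infix_iff ch l).mpr hm)

lemma find_char_decomp {l : List Char} {ch : Char}
    (h : PySem.Chars.find l [ch] ≠ -1) :
    (PySem.Chars.find l [ch]).toNat < l.length ∧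
    List.drop (PySem.Chars.find l [ch]).toNat l
      = ch :: List.drop ((PySem.Chars.find l [ch]).toNat + 1) l ∧
    ch ∉ List.take (PySem.Chars.find l [ch]).toNat l := by
  have hge : 0 ≤ PySem.Chars.find l [ch] := by
    have := PySem.Chars.neg_one_le_find l [ch]
    omega
  obtain ⟨hpre, hmin⟩ := PySem.Chars.find_spec hge
  set n := (PySem.Chars.find l [ch]).toNat with hn
  obtain ⟨t, ht⟩ := hpre
  have hdn : List.drop n l = ch :: t := by simpa using ht.symm
  have hlen : n < l.length := by
    have := congrArg List.length hdn
    simp [List.length_drop] at this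
    omega
  refine ⟨hlen, ?_, ?_⟩
  · have hdt : List.drop (n+1) l = t := by
      have : List.drop 1 (List.drop n l) = List.drop (n + 1) l := by
        rw [List.drop_drop]
      rw [← this, hdn]
      simp
    rw [hdn, hdt]
  · intro hm
    obtain ⟨i, hi, hgi⟩ := List.mem_iff_getElem.mp hm
    simp [List.getElem_take] at hgi hi
    exact hmin i hi.1 ⟨List.drop i.succ l, by
      have : List.drop i l = ch :: List.drop (i+1) l := by
        rw [List.drop_eq_getElem_cons (by omega : i < l.length), hgi]
      simp [this]⟩

lemma loop_eq (s : List Char) :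
    ∀ fuel (k : Nat) (acc : List String), k ≤ s.length → s.length + 1 ≤ fuel + k →
    pyALoop s fuel (k : Int) (k : Int) acc
      = acc ++ ((s.drop k).foldl bStep ([], [], 0)).1 := by
  intro fuel
  induction fuel with
  | zero => intro k acc hk hf; omega
  | succ fuel ih =>
    intro k acc hk hf
    set l := s.drop k with hl
    have hllen : l.length = s.length - k := by simp [hl]
    rw [pyALoop]
    simp only
    rw [PySem.Chars.findFrom_natCast s [','] k hk]
    by_cases e1 : PySem.Chars.find l [','] = -1
    · rw [← hl, if_pos (by simp [e1]), bfold_nocomma l [] [] 0 (find_char_none e1) (by omega)]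
      simp
    · rw [← hl]
      obtain ⟨hn1len, hd1, ht1⟩ := find_char_decomp e1
      set n1 := (PySem.Chars.find l [',']).toNat with hn1
      have hfind1 : PySem.Chars.find l [','] = (n1 : Int) := by
        have := PySem.Chars.neg_one_le_find l [',']
        omega
      set l2 := List.drop (n1 + 1) l with hl2
      have hl2len : l2.length = l.length - (n1 + 1) := by simp [hl2]
      have hdrop2 : List.drop (k + n1 + 1) s = l2 := by
        rw [hl2, hl, List.drop_drop]; congr 1
      have hlsplit : l = List.take n1 l ++ ',' :: l2 := by
        conv_lhs => rw [← List.take_append_drop n1 l]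
        rw [hd1]
      rw [hfind1, if_neg (show ¬((n1:Int) = -1) by omega),
          if_neg (show ¬((k:Int) + (n1:Int) = -1) by omega)]
      have hcast1 : (k : Int) + (n1 : Int) + 1 = ((k + n1 + 1 : Nat) : Int) := by push_cast; ring
      rw [hcast1, PySem.Chars.findFrom_natCast s [','] (k + n1 + 1) (by omega), hdrop2]
      by_cases e2 : PySem.Chars.find l2 [','] = -1
      · rw [if_pos (by simp [e2])]
        rw [hlsplit, bfold_consume_nocomma _ _ [] [] 0 ht1 (by omega)]
        simp only [List.foldl_cons, bStep]
        norm_num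
        rw [bfold_nocomma l2 [] _ _ (find_char_none e2) (by omega)]
      · obtain ⟨hn2len, hd2, ht2⟩ := find_char_decomp e2
        set n2 := (PySem.Chars.find l2 [',']).toNat with hn2
        have hfind2 : PySem.Chars.find l2 [','] = (n2 : Int) := by
          have := PySem.Chars.neg_one_le_find l2 [',']
          omega
        set l3 := List.drop (n2 + 1) l2 with hl3
        have hl3len : l3.length = l2.length - (n2 + 1) := by simp [hl3]
        have hdrop3 : List.drop (k + n1 + 1 + n2 + 1) s = l3 := by
          rw [hl3, ← hdrop2, List.drop_drop]; congr 1
        have hl2split : l2 = List.take n2 l2 ++ ',' :: l3 := by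
          conv_lhs => rw [← List.take_append_drop n2 l2]
          rw [hd2]
        rw [hfind2, if_neg (show ¬((n2:Int) = -1) by omega),
            if_neg (show ¬(((k + n1 + 1 : Nat):Int) + (n2:Int) = -1) by omega)]
        have hcast2 : ((k + n1 + 1 : Nat) : Int) + (n2 : Int) + 1 = ((k + n1 + 1 + n2 + 1 : Nat) : Int) := by push_cast; ring
        rw [hcast2, PySem.Chars.findFrom_natCast s ['.'] (k + n1 + 1 + n2 + 1) (by omega), hdrop3]
        by_cases e3 : PySem.Chars.find l3 ['.'] = -1
        · rw [if_pos (by simp [e3])]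
          rw [hlsplit, bfold_consume_nocomma _ _ [] [] 0 ht1 (by omega)]
          simp only [List.foldl_cons, bStep]
          norm_num
          rw [hl2split, bfold_consume_nocomma _ _ [] _ 1 ht2 (by omega)]
          simp only [List.foldl_cons, bStep]
          norm_num
          rw [bfold_nodot l3 [] _ _ (find_char_none e3) (by omega)]
        · obtain ⟨hn3len, hd3, ht3⟩ := find_char_decomp e3
          set n3 := (PySem.Chars.find l3 ['.']).toNat with hn3
          have hfind3 : PySem.Chars.find l3 ['.'] = (n3 : Int) := by
            have := PySem.Chars.neg_one_le_find l3 ['.']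
            omega
          set rest := List.drop (n3 + 1) l3 with hrest
          have hl3split : l3 = List.take n3 l3 ++ '.' :: rest := by
            conv_lhs => rw [← List.take_append_drop n3 l3]
            rw [hd3]
          rw [hfind3, if_neg (show ¬((n3:Int) = -1) by omega),
              if_neg (show ¬(((k + n1 + 1 + n2 + 1 : Nat):Int) + (n3:Int) = -1) by omega)]
          have hmlt : k + n1 + 1 + n2 + 1 + n3 < s.length := by omega
          rw [show ((k + n1 + 1 + n2 + 1 : Nat) : Int) + (n3 : Int)
                = ((k + n1 + 1 + n2 + 1 + n3 : Nat) : Int) from by push_cast; ring]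
          rw [show ((k + n1 + 1 + n2 + 1 + n3 : Nat) : Int) + 1
                = ((k + n1 + 1 + n2 + 1 + n3 + 1 : Nat) : Int) from by push_cast; ring]
          rw [add_zero]
          rw [if_neg (show ¬(((k + n1 + 1 + n2 + 1 + n3 + 1 : Nat) : Int) > (s.length : Int)) from by
                push_cast; omega)]
          rw [ih (k + n1 + 1 + n2 + 1 + n3 + 1) _ (by omega) (by omega)]
          have hdrop4 : List.drop (k + n1 + 1 + n2 + 1 + n3 + 1) s = rest := by
            rw [hrest, hl3, hl2, hl, List.drop_drop, List.drop_drop, List.drop_drop]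
            congr 1
            omega
          rw [hdrop4, PySem.List.slice_natCast]
          rw [← hl]
          have htake : List.take (k + n1 + 1 + n2 + 1 + n3 - k) l
              = List.take n1 l ++ ',' :: (List.take n2 l2 ++ ',' :: List.take n3 l3) := by
            rw [show k + n1 + 1 + n2 + 1 + n3 - k = n1 + ((n2 + (n3 + 1)) + 1) from by omega,
                List.take_add, hd1, List.take_succ_cons, List.take_add, hd2, List.take_succ_cons]
          rw [htake]
          conv_rhs => rw [hlsplit]
          rw [bfold_consume_nocomma _ _ [] [] 0 ht1 (by omega)]
          simp only [List.foldl_cons, bStep]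
          norm_num
          conv_rhs => rw [hl2split]
          rw [bfold_consume_nocomma _ _ [] _ 1 ht2 (by omega)]
          simp only [List.foldl_cons, bStep]
          norm_num
          conv_rhs => rw [hl3split]
          rw [bfold_consume_dot _ _ [] _ 2 ht3 (by omega)]
          rw [bfold_recs_mono]
          conv_rhs => rw [bfold_recs_mono]
          simp

-- ===== VERDICT (by name: the statement is the Claim_ definition above) =====
theorem split_species_string_py_spec : Claim_equal_split_species_string_py := by
  intro species _
  unfold Spec_split_species_string_py split_species_string_py split_species_string_py_alt
  simpa using loop_eq species.toList (species.toList.length + 1) 0 [] (by omega) (by omega)
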